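-- pv_equiv track=rewrite | github.com/gokul-labs/intrusion_detection_and_classification | etl_v2/process_data.py | udf_categories
-- ===== SOURCE A (Python) =====
-- from typing import Tuple, List, Text
--
-- def udf_categories(attack: Text) -> Text:
--     """
--     Returns the category of attack
--     :param attack: attack name
--     :return: attack type
--     """
--     attack_type_mapping = {
--         'dos_attacks': ['apache2', 'back', 'land', 'neptune', 'mailbomb', 'pod', 'processtable', 'smurf', 'teardrop',
--                         'udpstorm', 'worm'],
--         'probe_attacks': ['ipsweep', 'mscan', 'nmap', 'portsweep', 'saint', 'satan'],
--         'privilege_attacks': ['buffer_overflow', 'loadmdoule', 'perl', 'ps', 'rootkit', 'sqlattack', 'xterm'],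
--         'access_attacks': ['ftp_write', 'guess_passwd', 'http_tunnel', 'imap', 'multihop', 'named', 'phf', 'sendmail',
--                            'snmpgetattack', 'snmpguess', 'spy', 'warezclient', 'warezmaster', 'xclock', 'xsnoop'],
--         'normal': ['normal']}
--
--     for attack_type, list_of_attacks_in_type in attack_type_mapping.items():
--         if attack.strip().lower() in list_of_attacks_in_type:
--             return attack_type
-- ===== SOURCE B (Python) =====
-- # B: single flat name->category dict written out once; one hash lookup, no per-category loop or list scan.
-- _CATEGORY_OF = {
--     'apache2': 'dos_attacks',
--     'back': 'dos_attacks',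
--     'land': 'dos_attacks',
--     'neptune': 'dos_attacks',
--     'mailbomb': 'dos_attacks',
--     'pod': 'dos_attacks',
--     'processtable': 'dos_attacks',
--     'smurf': 'dos_attacks',
--     'teardrop': 'dos_attacks',
--     'udpstorm': 'dos_attacks',
--     'worm': 'dos_attacks',
--     'ipsweep': 'probe_attacks',
--     'mscan': 'probe_attacks',
--     'nmap': 'probe_attacks',
--     'portsweep': 'probe_attacks',
--     'saint': 'probe_attacks',
--     'satan': 'probe_attacks',
--     'buffer_overflow': 'privilege_attacks',
--     'loadmdoule': 'privilege_attacks',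
--     'perl': 'privilege_attacks',
--     'ps': 'privilege_attacks',
--     'rootkit': 'privilege_attacks',
--     'sqlattack': 'privilege_attacks',
--     'xterm': 'privilege_attacks',
--     'ftp_write': 'access_attacks',
--     'guess_passwd': 'access_attacks',
--     'http_tunnel': 'access_attacks',
--     'imap': 'access_attacks',
--     'multihop': 'access_attacks',
--     'named': 'access_attacks',
--     'phf': 'access_attacks',
--     'sendmail': 'access_attacks',
--     'snmpgetattack': 'access_attacks',
--     'snmpguess': 'access_attacks',
--     'spy': 'access_attacks',
--     'warezclient': 'access_attacks',
--     'warezmaster': 'access_attacks',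
--     'xclock': 'access_attacks',
--     'xsnoop': 'access_attacks',
--     'normal': 'normal',
-- }
--
--
-- def udf_categories(attack):
--     return _CATEGORY_OF.get(attack.strip().lower())
-- ===== Notes on version B (the rewrite author's own statement) =====
-- stated objective: idiomatic
-- what changed: B replaces A's per-category loop with list membership scans by a single flat name->category dict and one .get lookup on the normalized name.
import Mathlib
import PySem

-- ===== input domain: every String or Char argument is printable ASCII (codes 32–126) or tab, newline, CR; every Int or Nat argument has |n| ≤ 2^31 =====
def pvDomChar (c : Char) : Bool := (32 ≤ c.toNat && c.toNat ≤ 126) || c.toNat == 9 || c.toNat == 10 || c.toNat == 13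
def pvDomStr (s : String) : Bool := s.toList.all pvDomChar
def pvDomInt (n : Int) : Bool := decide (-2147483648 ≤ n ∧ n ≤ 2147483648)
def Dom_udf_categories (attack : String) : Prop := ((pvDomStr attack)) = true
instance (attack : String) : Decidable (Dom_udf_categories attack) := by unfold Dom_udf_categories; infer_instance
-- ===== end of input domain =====

-- B replaces A's per-category loop and list scans by one flat name->category dict and a single lookup (idiomatic).
set_option maxRecDepth 4000


-- ===== PORT A =====
-- A's dict literal, category -> list of attack names, in insertion order
def attackTable : List (String × List String) :=
  [("dos_attacks", ["apache2", "back", "land", "neptune", "mailbomb", "pod", "processtable", "smurf", "teardrop",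
                    "udpstorm", "worm"]),
   ("probe_attacks", ["ipsweep", "mscan", "nmap", "portsweep", "saint", "satan"]),
   ("privilege_attacks", ["buffer_overflow", "loadmdoule", "perl", "ps", "rootkit", "sqlattack", "xterm"]),
   ("access_attacks", ["ftp_write", "guess_passwd", "http_tunnel", "imap", "multihop", "named", "phf", "sendmail",
                       "snmpgetattack", "snmpguess", "spy", "warezclient", "warezmaster", "xclock", "xsnoop"]),
   ("normal", ["normal"])]

-- the for-loop over .items(): membership test recomputes attack.strip().lower() each iteration, as A does
def udfLoopA : List (String × List String) → String → Option String
  | [], _ => none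
  | (attackType, listOfAttacks) :: rest, attack =>
      if listOfAttacks.contains (PySem.Str.lower (PySem.Str.strip attack)) then some attackType
      else udfLoopA rest attack

def udf_categories (attack : String) : Option String :=
  udfLoopA attackTable attack

-- ===== PORT B =====
-- Source B's flat dict literal _CATEGORY_OF, name -> category, in insertion order
def invTable : List (String × String) :=
  [("apache2", "dos_attacks"),
   ("back", "dos_attacks"),
   ("land", "dos_attacks"),
   ("neptune", "dos_attacks"),
   ("mailbomb", "dos_attacks"),
   ("pod", "dos_attacks"),
   ("processtable", "dos_attacks"),
   ("smurf", "dos_attacks"),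
   ("teardrop", "dos_attacks"),
   ("udpstorm", "dos_attacks"),
   ("worm", "dos_attacks"),
   ("ipsweep", "probe_attacks"),
   ("mscan", "probe_attacks"),
   ("nmap", "probe_attacks"),
   ("portsweep", "probe_attacks"),
   ("saint", "probe_attacks"),
   ("satan", "probe_attacks"),
   ("buffer_overflow", "privilege_attacks"),
   ("loadmdoule", "privilege_attacks"),
   ("perl", "privilege_attacks"),
   ("ps", "privilege_attacks"),
   ("rootkit", "privilege_attacks"),
   ("sqlattack", "privilege_attacks"),
   ("xterm", "privilege_attacks"),
   ("ftp_write", "access_attacks"),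
   ("guess_passwd", "access_attacks"),
   ("http_tunnel", "access_attacks"),
   ("imap", "access_attacks"),
   ("multihop", "access_attacks"),
   ("named", "access_attacks"),
   ("phf", "access_attacks"),
   ("sendmail", "access_attacks"),
   ("snmpgetattack", "access_attacks"),
   ("snmpguess", "access_attacks"),
   ("spy", "access_attacks"),
   ("warezclient", "access_attacks"),
   ("warezmaster", "access_attacks"),
   ("xclock", "access_attacks"),
   ("xsnoop", "access_attacks"),
   ("normal", "normal")]

def udf_categories_alt (attack : String) : Option String :=
  (PySem.Dict.mk invTable).get? (PySem.Str.lower (PySem.Str.strip attack))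

-- ===== PRECONDITION & SPEC =====
def Spec_udf_categories (attack : String) (out : Option String) : Prop := out = udf_categories_alt attack
instance (attack : String) (out : Option String) : Decidable (Spec_udf_categories attack out) := by unfold Spec_udf_categories; infer_instance

-- ===== CLAIM (what is proved, stated in full; the proofs are below) =====
def Claim_equal_udf_categories : Prop := ∀ (attack : String), Dom_udf_categories attack → Spec_udf_categories attack (udf_categories attack)

-- ===== LEMMAS AND PROOFS =====

-- flatten of a category table into an association list, names first-to-last
def flatPairs (tbl : List (String × List String)) : List (String × String) :=
  tbl.flatMap (fun p => p.2.map (fun n => (n, p.1)))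

-- B's literal flat dict is exactly the flattened form of A's table (the names are pairwise distinct)
theorem invTable_eq_flat : invTable = flatPairs attackTable := by decide

-- lookup in a flattened block: first the names of one category, then the rest
theorem get?_mk_block (c : String) (l : List String) (rest : List (String × String)) (s : String) :
    (PySem.Dict.mk (l.map (fun n => (n, c)) ++ rest)).get? s
      = if l.contains s then some c else (PySem.Dict.mk rest).get? s := by
  induction l with
  | nil => simp
  | cons n t ih =>
      simp only [List.map_cons, List.cons_append, PySem.Dict.get?_mk_cons, ih, List.contains_cons]
      by_cases h : n = s
      · simp [h]
      · simp [h, Ne.symm h]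

-- first-match lookup in the flattened table = A's per-category loop with the normalized string
theorem get?_flat_eq_loop (tbl : List (String × List String)) (attack : String) :
    (PySem.Dict.mk (flatPairs tbl)).get? (PySem.Str.lower (PySem.Str.strip attack))
      = udfLoopA tbl attack := by
  induction tbl with
  | nil => simp [flatPairs, udfLoopA, PySem.Dict.get?]
  | cons p rest ih =>
      obtain ⟨c, l⟩ := p
      simp only [flatPairs, List.flatMap_cons, udfLoopA] at *
      rw [get?_mk_block]
      rw [ih]

-- ===== VERDICT (by name: the statement is the Claim_ definition above) =====
theorem udf_categories_spec : Claim_equal_udf_categories := by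
  intro attack _
  unfold Spec_udf_categories udf_categories udf_categories_alt
  rw [invTable_eq_flat, get?_flat_eq_loop]
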